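-- pv_equiv track=rewrite | github.com/DavidCarricondo/data-cleaning-pandas | src/cleaning_functions.py | timeclassify
-- ===== SOURCE A (Python) =====
-- def timeclassify(lst):
--     l = []
--     dict = {'Night' : ['night', 'midnight', 'evening', 'dark', 'dusk', 'sunset', 'dawn', 'dusk', 'sundown'],
--             'Day' : ['midday', 'afternoon', 'morning', 'noon', 'day', 'lunch']}
--     for i, e in enumerate(lst):
--         try:
--             if int(e) > 20 or int(e)< 8:
--                 l.append('Night')
--             else: l.append('Day')
--         except:
--             for k in dict.keys():
--                 if any(x in e.lower() for x in dict[k]):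
--                     l.append(k)
--                     break
--             if len(l) == i: l.append(None)
--     return l
-- ===== SOURCE B (Python) =====
-- # Reduced keyword sets: 'midnight' dropped (any text containing it contains 'night'),
-- # 'midday' dropped (contains 'day'), 'afternoon' dropped (contains 'noon'), dup 'dusk' dropped.
-- _NIGHT = ('night', 'evening', 'dark', 'dusk', 'sunset', 'dawn', 'sundown')
-- _DAY = ('morning', 'noon', 'day', 'lunch')
--
-- def _num(e):
--     try:
--         n = int(e)
--     except Exception:
--         return None
--     return 'Day' if 8 <= n <= 20 else 'Night'
--
-- def timeclassify(lst):
--     # stage 1: numeric classification (interval test); non-numeric left as None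
--     out = [_num(e) for e in lst]
--     lows = [e.lower() for e in lst]
--     # stage 2: fill unresolved slots that match a Night keyword
--     out = [('Night' if r is None and any(k in s for k in _NIGHT) else r)
--            for r, s in zip(out, lows)]
--     # stage 3: fill remaining unresolved slots that match a Day keyword
--     out = [('Day' if r is None and any(k in s for k in _DAY) else r)
--            for r, s in zip(out, lows)]
--     return out
-- ===== Notes on version B (the rewrite author's own statement) =====
-- stated objective: alternative
-- what changed: Replaces A's single index-tracking loop with per-element try/except and nested category-dict scans by three staged whole-list passes (numeric interval test, then a Night-keyword fill pass, then a Day-keyword fill pass) over keyword sets reduced by removing keywords that textually contain another keyword of the same category.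
import Mathlib
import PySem

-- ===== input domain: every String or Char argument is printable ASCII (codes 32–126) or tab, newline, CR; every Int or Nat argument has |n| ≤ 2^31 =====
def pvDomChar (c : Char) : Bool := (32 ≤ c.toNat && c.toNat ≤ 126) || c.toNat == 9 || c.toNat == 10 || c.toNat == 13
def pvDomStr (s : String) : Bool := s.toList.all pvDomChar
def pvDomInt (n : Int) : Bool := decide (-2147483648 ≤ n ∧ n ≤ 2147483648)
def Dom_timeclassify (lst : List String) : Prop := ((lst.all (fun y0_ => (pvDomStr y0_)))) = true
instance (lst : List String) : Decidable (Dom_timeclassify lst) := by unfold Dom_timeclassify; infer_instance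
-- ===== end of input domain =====

-- B replaces A's single accumulator loop (per-element try/except plus nested dict scan and
-- len(l)==i None-patch) by three staged whole-list passes over reduced keyword sets (alternative).

-- ===== PORT A =====
def pvDictA : PySem.Dict String (List String) :=
  PySem.Dict.ofList
    [("Night", ["night", "midnight", "evening", "dark", "dusk", "sunset", "dawn", "dusk", "sundown"]),
     ("Day", ["midday", "afternoon", "morning", "noon", "day", "lunch"])]

-- the inner 'for k in dict.keys(): … break' loop
def pvExceptA (e : String) (ks : List String) (l : List (Option String)) : List (Option String) :=
  match ks with
  | [] => l
  | k :: rest =>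
    if (PySem.Dict.getD pvDictA k []).any (fun x => PySem.Str.isIn x (PySem.Str.lower e)) then
      l ++ [some k]
    else pvExceptA e rest l

-- the 'for i, e in enumerate(lst)' loop with accumulator l
def pvLoopA (lst : List String) (i : Nat) (l : List (Option String)) : List (Option String) :=
  match lst with
  | [] => l
  | e :: rest =>
    let l' :=
      match PySem.Int.ofStr? e with
      | some n => if n > 20 ∨ n < 8 then l ++ [some "Night"] else l ++ [some "Day"]
      | none =>
        let l2 := pvExceptA e (PySem.Dict.keys pvDictA) l
        if l2.length == i then l2 ++ [none] else l2
    pvLoopA rest (i + 1) l'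

def timeclassify (lst : List String) : List (Option String) := pvLoopA lst 0 []

-- ===== PORT B =====
def pvNightR : List String := ["night", "evening", "dark", "dusk", "sunset", "dawn", "sundown"]
def pvDayR : List String := ["morning", "noon", "day", "lunch"]

def pvNum (e : String) : Option String :=
  match PySem.Int.ofStr? e with
  | none => none
  | some n => some (if 8 ≤ n ∧ n ≤ 20 then "Day" else "Night")

def timeclassify_alt (lst : List String) : List (Option String) :=
  let out1 := lst.map pvNum
  let lows := lst.map PySem.Str.lower
  let out2 := (out1.zip lows).map (fun p =>
    if p.1 = none ∧ pvNightR.any (fun k => PySem.Str.isIn k p.2) then some "Night" else p.1)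
  let out3 := (out2.zip lows).map (fun p =>
    if p.1 = none ∧ pvDayR.any (fun k => PySem.Str.isIn k p.2) then some "Day" else p.1)
  out3

-- ===== PRECONDITION & SPEC =====
def Spec_timeclassify (lst : List String) (out : List (Option String)) : Prop := out = timeclassify_alt lst
instance (lst : List String) (out : List (Option String)) : Decidable (Spec_timeclassify lst out) := by unfold Spec_timeclassify; infer_instance

-- ===== CLAIM (what is proved, stated in full; the proofs are below) =====
def Claim_equal_timeclassify : Prop := ∀ (lst : List String), Dom_timeclassify lst → Spec_timeclassify lst (timeclassify lst)

-- ===== LEMMAS AND PROOFS =====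

def pvNightKws : List String := ["night", "midnight", "evening", "dark", "dusk", "sunset", "dawn", "dusk", "sundown"]
def pvDayKws : List String := ["midday", "afternoon", "morning", "noon", "day", "lunch"]

-- per-element characterisation of A's body
def pvClassifyA (e : String) : Option String :=
  match PySem.Int.ofStr? e with
  | some n => some (if n > 20 ∨ n < 8 then "Night" else "Day")
  | none =>
    if pvNightKws.any (fun x => PySem.Str.isIn x (PySem.Str.lower e)) then some "Night"
    else if pvDayKws.any (fun x => PySem.Str.isIn x (PySem.Str.lower e)) then some "Day"
    else none

lemma pvExceptA_eq (e : String) (l : List (Option String)) :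
    pvExceptA e (PySem.Dict.keys pvDictA) l =
      if pvNightKws.any (fun x => PySem.Str.isIn x (PySem.Str.lower e)) then l ++ [some "Night"]
      else if pvDayKws.any (fun x => PySem.Str.isIn x (PySem.Str.lower e)) then l ++ [some "Day"]
      else l := by
  have hk : PySem.Dict.keys pvDictA = ["Night", "Day"] := rfl
  have hN : PySem.Dict.getD pvDictA "Night" [] = pvNightKws := rfl
  have hD : PySem.Dict.getD pvDictA "Day" [] = pvDayKws := rfl
  rw [hk]
  simp only [pvExceptA, hN, hD]

lemma pvStep (e : String) (l : List (Option String)) :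
    (match PySem.Int.ofStr? e with
      | some n => if n > 20 ∨ n < 8 then l ++ [some "Night"] else l ++ [some "Day"]
      | none =>
        let l2 := pvExceptA e (PySem.Dict.keys pvDictA) l
        if l2.length == l.length then l2 ++ [none] else l2) = l ++ [pvClassifyA e] := by
  cases h : PySem.Int.ofStr? e with
  | some n => simp [pvClassifyA, h]; split_ifs <;> try simp
  | none =>
    simp only [pvClassifyA, h, pvExceptA_eq]
    split_ifs <;> simp_all

lemma pvLoopA_eq (lst : List String) : ∀ (l : List (Option String)),
    pvLoopA lst l.length l = l ++ lst.map pvClassifyA := by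
  induction lst with
  | nil => intro l; simp [pvLoopA]
  | cons e rest ih =>
    intro l
    show pvLoopA (e :: rest) l.length l = _
    rw [pvLoopA]
    simp only [pvStep e l]
    have : l.length + 1 = (l ++ [pvClassifyA e]).length := by simp
    rw [this, ih]
    simp

-- keyword-set reduction: a text containing 'midnight' contains 'night', etc.
lemma pvInfix_mono (a b s : String) (hab : a.toList <:+: b.toList)
    (h : PySem.Str.isIn b s = true) : PySem.Str.isIn a s = true := by
  rw [PySem.Str.isIn_iff_infix] at *
  exact hab.trans h

lemma pvNight_any_eq (s : String) :
    pvNightKws.any (fun x => PySem.Str.isIn x s) = pvNightR.any (fun x => PySem.Str.isIn x s) := by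
  simp only [pvNightKws, pvNightR, List.any_cons, List.any_nil]
  cases hn : PySem.Str.isIn "night" s with
  | true => simp
  | false =>
    have hm : PySem.Str.isIn "midnight" s = false := by
      cases hm : PySem.Str.isIn "midnight" s
      · rfl
      · exact absurd (pvInfix_mono "night" "midnight" s (by decide) hm) (by rw [hn]; simp)
    cases hd : PySem.Str.isIn "dusk" s <;> simp only [hm] <;> simp

lemma pvDay_any_eq (s : String) :
    pvDayKws.any (fun x => PySem.Str.isIn x s) = pvDayR.any (fun x => PySem.Str.isIn x s) := by
  simp only [pvDayKws, pvDayR, List.any_cons, List.any_nil]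
  cases hd : PySem.Str.isIn "day" s with
  | true =>
    cases hn : PySem.Str.isIn "noon" s <;> simp
  | false =>
    have hmd : PySem.Str.isIn "midday" s = false := by
      cases h : PySem.Str.isIn "midday" s
      · rfl
      · exact absurd (pvInfix_mono "day" "midday" s (by decide) h) (by rw [hd]; simp)
    cases hn : PySem.Str.isIn "noon" s with
    | true => simp only [hmd]; simp
    | false =>
      have haf : PySem.Str.isIn "afternoon" s = false := by
        cases h : PySem.Str.isIn "afternoon" s
        · rfl
        · exact absurd (pvInfix_mono "noon" "afternoon" s (by decide) h) (by rw [hn]; simp)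
      simp only [hmd, haf]; simp

-- B's staged passes, per element
lemma pvElem (e : String) :
    pvClassifyA e =
      (fun r =>
        if r = none ∧ pvDayR.any (fun k => PySem.Str.isIn k (PySem.Str.lower e)) then some "Day" else r)
      ((fun r =>
        if r = none ∧ pvNightR.any (fun k => PySem.Str.isIn k (PySem.Str.lower e)) then some "Night" else r)
      (pvNum e)) := by
  cases h : PySem.Int.ofStr? e with
  | some n =>
    simp only [pvClassifyA, pvNum, h]
    split_ifs <;> simp_all <;> omega
  | none =>
    simp only [pvClassifyA, pvNum, h, pvNight_any_eq, pvDay_any_eq]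
    cases hN : pvNightR.any (fun k => PySem.Str.isIn k (PySem.Str.lower e)) <;>
      cases hD : pvDayR.any (fun k => PySem.Str.isIn k (PySem.Str.lower e)) <;>
        simp

lemma pvZipMapMap {α β γ δ : Type} (l : List α) (f : α → β) (g : α → γ) (h : β × γ → δ) :
    ((l.map f).zip (l.map g)).map h = l.map (fun a => h (f a, g a)) := by
  induction l with
  | nil => rfl
  | cons x xs ih => simp [ih]

lemma pvAlt_eq_map (lst : List String) : timeclassify_alt lst = lst.map pvClassifyA := by
  show (((((lst.map pvNum).zip (lst.map PySem.Str.lower)).map (fun p =>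
      if p.1 = none ∧ pvNightR.any (fun k => PySem.Str.isIn k p.2) then some "Night" else p.1)).zip
        (lst.map PySem.Str.lower)).map (fun p =>
      if p.1 = none ∧ pvDayR.any (fun k => PySem.Str.isIn k p.2) then some "Day" else p.1)) =
    lst.map pvClassifyA
  rw [pvZipMapMap, pvZipMapMap]
  apply List.map_congr_left
  intro e _
  exact (pvElem e).symm

-- ===== VERDICT (by name: the statement is the Claim_ definition above) =====
theorem timeclassify_spec : Claim_equal_timeclassify := by
  intro lst _
  show timeclassify lst = timeclassify_alt lst
  rw [pvAlt_eq_map]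
  simpa [timeclassify] using pvLoopA_eq lst ([] : List (Option String))
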